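-- pv_equiv track=rewrite | github.com/alexmosci/nasa-dcgr-astrobotic-rover | src/cellular_decomposition.py | getFreeSegments
-- ===== SOURCE A (Python) =====
-- def getFreeSegments(column):
--     segments = []
--     inSegment = False
--     start = 0
--     for i, val in enumerate(column):
--         if val == 0 and not inSegment:
--             start = i
--             inSegment = True
--         elif val == 1 and inSegment:
--             segments.append((start, i))
--             inSegment = False
--     if inSegment:
--         segments.append((start, len(column)))
--     return segments
-- ===== SOURCE B (Python) =====
-- def getFreeSegments(column):
--     # Boundary-block decomposition: each 1 closes a block; the first 0 inside
--     # a block opens the segment that the closing 1 (or the list end) terminates.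
--     segments = []
--     prev = 0
--     for i, val in enumerate(column):
--         if val == 1:
--             for j in range(prev, i):
--                 if column[j] == 0:
--                     segments.append((j, i))
--                     break
--             prev = i + 1
--     for j in range(prev, len(column)):
--         if column[j] == 0:
--             segments.append((j, len(column)))
--             break
--     return segments
-- ===== Notes on version B (the rewrite author's own statement) =====
-- stated objective: alternative
-- what changed: Replaced the inSegment-flag state machine with a boundary-block decomposition: the positions of 1s delimit blocks and each block is scanned for its first 0, which starts the segment closed by that 1 (or by the end of the list).
import Mathlib
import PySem

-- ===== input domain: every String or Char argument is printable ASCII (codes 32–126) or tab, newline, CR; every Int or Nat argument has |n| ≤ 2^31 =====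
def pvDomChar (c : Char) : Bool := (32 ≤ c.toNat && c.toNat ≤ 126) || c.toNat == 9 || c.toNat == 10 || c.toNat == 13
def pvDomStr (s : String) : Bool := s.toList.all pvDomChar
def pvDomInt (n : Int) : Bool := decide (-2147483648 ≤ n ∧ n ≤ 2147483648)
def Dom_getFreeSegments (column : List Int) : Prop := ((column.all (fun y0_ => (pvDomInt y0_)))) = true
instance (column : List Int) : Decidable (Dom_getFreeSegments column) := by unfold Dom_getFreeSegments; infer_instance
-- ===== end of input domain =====

-- B differs from A only in decomposition (boundary blocks vs a state flag); same value everywhere.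

-- ===== PORT A =====
-- A's for-loop over enumerate(column) carrying (segments, inSegment, start)
def loopA (xs : List Int) (i : Nat) (segs : List (Int × Int)) (inSeg : Bool) (start : Int) :
    List (Int × Int) × Bool × Int :=
  match xs with
  | [] => (segs, inSeg, start)
  | v :: rest =>
    if v == 0 && !inSeg then loopA rest (i+1) segs true (i : Int)
    else if v == 1 && inSeg then loopA rest (i+1) (segs ++ [(start, (i : Int))]) false start
    else loopA rest (i+1) segs inSeg start

def getFreeSegments (column : List Int) : List (Int × Int) :=
  let st := loopA column 0 [] false 0
  if st.2.1 then st.1 ++ [(st.2.2, (column.length : Int))] else st.1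

-- ===== PORT B =====
-- B's inner 'for j in range(lo, hi): if column[j] == 0: … break' scan
def firstZero (col : List Int) (lo hi : Nat) : Option Int :=
  if lo < hi then
    if col.getD lo 1 == 0 then some (lo : Int) else firstZero col (lo+1) hi
  else none
termination_by hi - lo

-- B's outer for-loop over enumerate(column) carrying (segments, prev)
def loopB (col : List Int) (xs : List Int) (i : Nat) (segs : List (Int × Int)) (prev : Nat) :
    List (Int × Int) × Nat :=
  match xs with
  | [] => (segs, prev)
  | v :: rest =>
    if v == 1 then
      loopB col rest (i+1)
        (match firstZero col prev i with
         | some j => segs ++ [(j, (i : Int))]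
         | none => segs) (i+1)
    else loopB col rest (i+1) segs prev

def getFreeSegments_alt (column : List Int) : List (Int × Int) :=
  let st := loopB column column 0 [] 0
  match firstZero column st.2 column.length with
  | some j => st.1 ++ [(j, (column.length : Int))]
  | none => st.1

-- ===== PRECONDITION & SPEC =====
def Spec_getFreeSegments (column : List Int) (out : List (Int × Int)) : Prop := out = getFreeSegments_alt column
instance (column : List Int) (out : List (Int × Int)) : Decidable (Spec_getFreeSegments column out) := by unfold Spec_getFreeSegments; infer_instance

-- ===== CLAIM (what is proved, stated in full; the proofs are below) =====
def Claim_equal_getFreeSegments : Prop := ∀ (column : List Int), Dom_getFreeSegments column → Spec_getFreeSegments column (getFreeSegments column)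

-- ===== LEMMAS AND PROOFS =====

theorem firstZero_self (col : List Int) (lo : Nat) : firstZero col lo lo = none := by
  unfold firstZero; simp

-- extending the scanned range by one position on the right
theorem firstZero_ext (col : List Int) (lo i : Nat) (h : lo ≤ i) :
    firstZero col lo (i+1) =
      (firstZero col lo i).orElse (fun _ => if col.getD i 1 == 0 then some (i : Int) else none) := by
  induction hk : i - lo generalizing lo with
  | zero =>
    have : lo = i := by omega
    subst this
    rw [firstZero_self]
    unfold firstZero
    simp [firstZero_self]
  | succ n ih =>
    have hlt : lo < i := by omega
    have L : firstZero col lo (i+1)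
        = if col.getD lo 1 == 0 then some (lo : Int) else firstZero col (lo+1) (i+1) := by
      rw [firstZero]; simp only [show lo < i + 1 from by omega, if_true]
    have R : firstZero col lo i
        = if col.getD lo 1 == 0 then some (lo : Int) else firstZero col (lo+1) i := by
      rw [firstZero]; simp only [hlt, if_true]
    rw [L, R]
    by_cases hz : col.getD lo 1 == 0
    · simp only [if_pos hz]
      rfl
    · simp only [if_neg hz]
      exact ih (lo+1) (by omega) (by omega)

-- the main step lemma: A's loop + finalization = B's loop + finalization.
-- Invariant: A's flag/start pair records exactly the first 0 of B's current block [prev, i).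
theorem loop_eq (col : List Int) :
    ∀ (xs : List Int) (i prev : Nat) (inSeg : Bool) (start : Int) (segs : List (Int × Int)),
      xs = col.drop i → i ≤ col.length → prev ≤ i →
      firstZero col prev i = (if inSeg then some start else none) →
      (let st := loopA xs i segs inSeg start
       if st.2.1 then st.1 ++ [(st.2.2, (col.length : Int))] else st.1) =
      (let st := loopB col xs i segs prev
       match firstZero col st.2 col.length with
       | some j => st.1 ++ [(j, (col.length : Int))]
       | none => st.1) := by
  intro xs
  induction xs with
  | nil =>
    intro i prev inSeg start segs hdrop hle hpi hinv
    have hi : i = col.length := by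
      have := List.drop_eq_nil_iff.mp hdrop.symm; omega
    subst hi
    cases inSeg <;> simp [loopA, loopB, hinv]
  | cons v rest ih =>
    intro i prev inSeg start segs hdrop hle hpi hinv
    have hcons : col.drop i = v :: rest := hdrop.symm
    have hi : i < col.length := by
      by_contra hcon
      have : col.drop i = [] := List.drop_eq_nil_iff.mpr (by omega)
      rw [this] at hcons; exact (List.cons_ne_nil _ _) hcons.symm
    have hv : col.getD i 1 = v := by
      have hg : col[i]? = some v := by
        have h2 : (List.drop i col)[0]? = col[i+0]? := List.getElem?_drop
        rw [hcons] at h2; simpa using h2.symm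
      simp [List.getD, hg]
    have hrest : rest = col.drop (i+1) := by
      have h2 : (col.drop i).tail = rest := by rw [hcons]; rfl
      rw [List.tail_drop] at h2; exact h2.symm
    have hext := firstZero_ext col prev i hpi
    rw [hinv, hv] at hext
    rw [loopA, loopB]
    by_cases h0 : v = 0
    · subst h0
      simp only [show ((0:Int) == 0) = true from rfl, show ((0:Int) == 1) = false from rfl,
        Bool.true_and, Bool.false_and, if_false, Bool.false_eq_true]
      cases inSeg with
      | false =>
        simp only [Bool.not_false, if_true]
        exact ih (i+1) prev true (i : Int) segs hrest (by omega) (by omega)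
          (by simpa using hext)
      | true =>
        simp only [Bool.not_true]
        exact ih (i+1) prev true start segs hrest (by omega) (by omega)
          (by simpa using hext)
    · by_cases h1 : v = 1
      · subst h1
        simp only [show ((1:Int) == 0) = false from rfl, show ((1:Int) == 1) = true from rfl,
          Bool.false_and, Bool.true_and, if_false, if_true, Bool.false_eq_true]
        cases inSeg with
        | true =>
          simp only [if_true, hinv]
          exact ih (i+1) (i+1) false start (segs ++ [(start, (i : Int))]) hrest (by omega)
            (le_refl _) (by simp [firstZero_self])
        | false =>
          simp only [if_false, hinv]
          exact ih (i+1) (i+1) false start segs hrest (by omega)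
            (le_refl _) (by simp [firstZero_self])
      · have hb0 : (v == 0) = false := by simp [h0]
        have hb1 : (v == 1) = false := by simp [h1]
        simp only [hb0, hb1, Bool.false_and, if_false, Bool.false_eq_true]
        have hinv' : firstZero col prev (i+1) = (if inSeg then some start else none) := by
          rw [hext, hb0]
          cases inSeg <;> rfl
        exact ih (i+1) prev inSeg start segs hrest (by omega) (by omega) hinv'

-- ===== VERDICT (by name: the statement is the Claim_ definition above) =====
theorem getFreeSegments_spec : Claim_equal_getFreeSegments := by
  intro column _
  unfold Spec_getFreeSegments getFreeSegments getFreeSegments_alt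
  have := loop_eq column column 0 0 false 0 [] (by simp) (by simp) (le_refl _)
    (by simp [firstZero_self])
  simpa using this
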